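-- pv_equiv track=rewrite | github.com/Pkpallaw16/Data-Structure-And-Algorithms | 5 Recursion/6Logarithmic_power.py | logarithmic_product
-- ===== SOURCE A (Python) =====
-- def logarithmic_product(n,pow):
--     if pow==0:
--         return 1
--     halftot=logarithmic_product(n,int(pow/2))
--     total=halftot*halftot
--     if pow%2==1:
--         total=total*n
--
--     return total    # if we print directly fact here it is giving error but if we are returning fact it is working fine
-- ===== SOURCE B (Python) =====
-- def logarithmic_product(n, pow):
--     # iterative: record the parity chain of int(p/2) halvings, then fold MSB-first
--     parities = []
--     p = pow
--     while p != 0: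
--         parities.append(p % 2)
--         p = int(p / 2)
--     total = 1
--     for m in reversed(parities):
--         total = total * total
--         if m == 1:
--             total = total * n
--     return total
-- ===== Notes on version B (the rewrite author's own statement) =====
-- stated objective: alternative
-- what changed: Replaces the recursion by an explicit two-phase iteration: first build the list of parities along the int(p/2) halving chain, then fold from the deepest level upward (total=total*total, times n on odd levels).
import Mathlib
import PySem

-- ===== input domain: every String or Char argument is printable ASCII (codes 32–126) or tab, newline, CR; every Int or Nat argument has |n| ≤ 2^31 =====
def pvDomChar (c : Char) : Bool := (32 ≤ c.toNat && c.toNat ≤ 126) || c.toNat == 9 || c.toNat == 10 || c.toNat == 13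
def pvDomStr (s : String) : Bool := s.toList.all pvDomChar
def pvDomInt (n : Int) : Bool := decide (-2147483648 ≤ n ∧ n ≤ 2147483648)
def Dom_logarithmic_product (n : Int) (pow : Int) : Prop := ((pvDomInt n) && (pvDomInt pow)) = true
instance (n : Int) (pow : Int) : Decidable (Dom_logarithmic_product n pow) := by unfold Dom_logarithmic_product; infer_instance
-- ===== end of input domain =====

-- B replaces A's recursion by an explicit two-phase iteration (build the parity chain
-- of int(p/2) halvings, then fold MSB-first); objective: alternative decomposition, same cost.


-- termination helper: |int(p/2)| < |p| for p ≠ 0 (used by both ports' recursions)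
theorem pvHalfLt (p : Int) (h : p ≠ 0) : (Int.tdiv p 2).natAbs < p.natAbs := by
  have h1 : (Int.tdiv p 2).natAbs = p.natAbs / 2 := by
    rw [Int.natAbs_tdiv]; rfl
  have h2 := Int.natAbs_pos.mpr h
  omega

-- ===== PORT A =====
-- int(pow/2) truncates toward zero (exact on Dom, |pow| ≤ 2^31 < 2^53) = Int.tdiv;
-- Python's pow % 2 = PySem.Int.mod pow 2.
def logarithmic_product (n : Int) (pow : Int) : Int :=
  if _h : pow = 0 then 1
  else
    let halftot := logarithmic_product n (Int.tdiv pow 2)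
    let total := halftot * halftot
    if PySem.Int.mod pow 2 == 1 then total * n else total
termination_by pow.natAbs
decreasing_by exact pvHalfLt pow _h

-- ===== PORT B =====
-- phase 1: the parity chain along the int(p/2) halvings (the while loop of Source B)
def pvParities (p : Int) : List Int :=
  if _h : p = 0 then []
  else PySem.Int.mod p 2 :: pvParities (Int.tdiv p 2)
termination_by p.natAbs
decreasing_by exact pvHalfLt p _h

-- phase 2: fold over reversed(parities)
def logarithmic_product_alt (n : Int) (pow : Int) : Int :=
  (pvParities pow).reverse.foldl
    (fun total m => let t := total * total; if m == 1 then t * n else t) 1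

-- ===== PRECONDITION & SPEC =====
def Spec_logarithmic_product (n : Int) (pow : Int) (out : Int) : Prop := out = logarithmic_product_alt n pow
instance (n : Int) (pow : Int) (out : Int) : Decidable (Spec_logarithmic_product n pow out) := by unfold Spec_logarithmic_product; infer_instance

-- ===== CLAIM (what is proved, stated in full; the proofs are below) =====
def Claim_equal_logarithmic_product : Prop := ∀ (n : Int) (pow : Int), Dom_logarithmic_product n pow → Spec_logarithmic_product n pow (logarithmic_product n pow)

-- ===== LEMMAS AND PROOFS =====

theorem pvAlt_eq (n : Int) : ∀ (k : Nat) (pow : Int), pow.natAbs = k →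
    logarithmic_product_alt n pow = logarithmic_product n pow := by
  intro k
  induction k using Nat.strong_induction_on with
  | _ k ih =>
    intro pow hk
    by_cases h : pow = 0
    · subst h
      simp [logarithmic_product_alt, pvParities, logarithmic_product]
    · have hrec := ih (Int.tdiv pow 2).natAbs (hk ▸ pvHalfLt pow h) (Int.tdiv pow 2) rfl
      rw [logarithmic_product_alt, pvParities, dif_neg h, List.reverse_cons,
        List.foldl_append, List.foldl_cons, List.foldl_nil]
      rw [logarithmic_product_alt] at hrec
      rw [hrec]
      conv_rhs => rw [logarithmic_product, dif_neg h]

-- ===== VERDICT (by name: the statement is the Claim_ definition above) =====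
theorem logarithmic_product_spec : Claim_equal_logarithmic_product := by
  intro n pow _
  unfold Spec_logarithmic_product
  exact (pvAlt_eq n pow.natAbs pow rfl).symm
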